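-- pv_equiv track=rewrite | github.com/nhartz24/Python | ExamI_S19_soltns.py | famous_last_words
-- ===== SOURCE A (Python) =====
-- def famous_last_words(s):
--     # signature: str -> str
--     # preconditions: presume that s is type string and the last character is not a space
--     # returns the last alphabetic word from the input string s
--
--     acc=''
--     for x in s:
--         if x ==' ': # quotes contain space
--             acc = '' # reset to a new word empty quotes
--         elif x.isalpha():
--             acc +=x
--     return acc
-- ===== SOURCE B (Python) =====
-- def famous_last_words(s):
--     # Phase 1: locate the boundary — the segment after the last literal ' '.
--     tail = s.rpartition(' ')[2]
--     # Phase 2: keep only the alphabetic characters of that segment.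
--     return ''.join(c for c in tail if c.isalpha())
-- ===== Notes on version B (the rewrite author's own statement) =====
-- stated objective: simpler
-- what changed: Replaces the single-pass accumulate-and-reset loop by a two-phase decomposition: rpartition locates the segment after the last space character, then a filter keeps its alphabetic characters.
import Mathlib
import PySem

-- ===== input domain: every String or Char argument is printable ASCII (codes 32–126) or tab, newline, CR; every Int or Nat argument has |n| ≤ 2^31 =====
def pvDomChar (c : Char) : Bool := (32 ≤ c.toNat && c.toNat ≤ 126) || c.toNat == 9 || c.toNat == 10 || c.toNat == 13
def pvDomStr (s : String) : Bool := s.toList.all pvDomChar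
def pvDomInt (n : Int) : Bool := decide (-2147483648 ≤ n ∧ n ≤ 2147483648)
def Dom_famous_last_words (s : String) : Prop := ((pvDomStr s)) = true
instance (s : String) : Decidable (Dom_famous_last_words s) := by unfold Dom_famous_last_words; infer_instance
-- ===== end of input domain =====

-- B replaces A's accumulate-and-reset loop by a two-phase decomposition: locate the segment
-- after the last ' ' (rpartition), then filter it for alphabetic characters.


-- ===== PORT A =====
-- A: single pass; reset the accumulator on ' ', append alphabetic chars, skip the rest.
def famous_last_words (s : String) : String :=
  String.ofList (s.toList.foldl
    (fun acc x => if x = ' ' then [] else if PySem.Chars.isalpha x then acc ++ [x] else acc) [])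

-- ===== PORT B =====
-- B: tail = s.rpartition(' ')[2] — the (possibly whole) segment after the last ' ' —
-- then keep its alphabetic characters.
def famous_last_words_alt (s : String) : String :=
  let tail := (s.toList.reverse.takeWhile (· ≠ ' ')).reverse
  String.ofList (tail.filter PySem.Chars.isalpha)

-- ===== PRECONDITION & SPEC =====
def Spec_famous_last_words (s : String) (out : String) : Prop := out = famous_last_words_alt s
instance (s : String) (out : String) : Decidable (Spec_famous_last_words s out) := by unfold Spec_famous_last_words; infer_instance

-- ===== CLAIM (what is proved, stated in full; the proofs are below) =====
def Claim_equal_famous_last_words : Prop := ∀ (s : String), Dom_famous_last_words s → Spec_famous_last_words s (famous_last_words s)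

-- ===== LEMMAS AND PROOFS =====

-- Loop invariant for A's fold, stated for the whole list by reverse induction:
-- the result is the filtered tail after the last ' ', prefixed by acc iff no ' ' occurs.
theorem flw_fold_eq (l acc : List Char) :
    l.foldl (fun acc x => if x = ' ' then [] else if PySem.Chars.isalpha x then acc ++ [x] else acc) acc
      = (if ' ' ∈ l then [] else acc) ++ ((l.reverse.takeWhile (· ≠ ' ')).reverse.filter PySem.Chars.isalpha) := by
  induction l using List.reverseRecOn with
  | nil => simp
  | append_singleton xs c ih =>
      rw [List.foldl_append]
      simp only [List.foldl_cons, List.foldl_nil, ih, List.reverse_append, List.reverse_singleton,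
        List.singleton_append, List.takeWhile_cons, List.mem_append, List.mem_singleton]
      by_cases hc : c = ' '
      · simp [hc]
      · have hc' : ¬ (' ' = c) := fun h => hc h.symm
        by_cases ha : PySem.Chars.isalpha c = true
        · simp [hc, hc', ha, List.filter_append]
        · simp [hc, hc', ha, List.filter_append]

theorem famous_last_words_eq (s : String) :
    famous_last_words s = famous_last_words_alt s := by
  simp [famous_last_words, famous_last_words_alt, flw_fold_eq]

-- ===== VERDICT (by name: the statement is the Claim_ definition above) =====
theorem famous_last_words_spec : Claim_equal_famous_last_words := by
  intro s _
  exact famous_last_words_eq s
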